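-- pv_equiv track=rewrite | github.com/Hemant-Jain-Author/Problem-Solving-in-Data-Structures-Algorithms-using-Python | IntroductoryChapters/Analysis.py | fun9
-- ===== SOURCE A (Python) =====
-- def fun9(n):
--     m = 0
--     i = n
--     while i > 0:
--         j = 0
--         while j < i:
--             m += 1
--             j += 1
--         i //= 2
--     return m
-- ===== SOURCE B (Python) =====
-- def fun9(n):
--     # Faster: add i directly instead of an inner counting loop (O(log n) iterations).
--     m = 0
--     i = n
--     while i > 0:
--         m += i
--         i //= 2
--     return m
-- ===== Notes on version B (the rewrite author's own statement) =====
-- stated objective: faster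
-- what changed: Replaces the inner counting loop (m incremented i times) by adding i directly, so only the O(log n) halving loop remains.
import Mathlib
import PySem

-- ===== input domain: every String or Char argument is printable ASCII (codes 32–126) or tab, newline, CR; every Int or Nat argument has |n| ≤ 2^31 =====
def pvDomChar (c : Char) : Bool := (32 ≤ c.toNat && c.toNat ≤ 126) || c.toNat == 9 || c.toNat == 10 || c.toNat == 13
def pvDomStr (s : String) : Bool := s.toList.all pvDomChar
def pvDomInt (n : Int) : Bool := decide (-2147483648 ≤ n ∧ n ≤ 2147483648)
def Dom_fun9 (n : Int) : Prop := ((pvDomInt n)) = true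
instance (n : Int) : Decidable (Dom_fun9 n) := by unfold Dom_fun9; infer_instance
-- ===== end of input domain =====

-- B replaces A's inner counting loop by adding i directly: O(log n) instead of O(n).

theorem pvHalf_lt (i : Int) (h : 0 < i) : (PySem.Int.floordiv i 2).toNat < i.toNat := by
  rw [PySem.Int.floordiv_eq_ediv_of_pos (by omega)]
  omega

-- ===== PORT A =====
-- inner 'while j < i: m += 1; j += 1'
def fun9Inner (i j m : Int) : Int :=
  if j < i then fun9Inner i (j + 1) (m + 1) else m
termination_by (i - j).toNat
decreasing_by omega

-- outer 'while i > 0: <inner loop>; i //= 2'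
def fun9Outer (i m : Int) : Int :=
  if i > 0 then fun9Outer (PySem.Int.floordiv i 2) (fun9Inner i 0 m) else m
termination_by i.toNat
decreasing_by exact pvHalf_lt i (by omega)

def fun9 (n : Int) : Int := fun9Outer n 0

-- ===== PORT B =====
-- 'while i > 0: m += i; i //= 2'
def fun9AltLoop (i m : Int) : Int :=
  if i > 0 then fun9AltLoop (PySem.Int.floordiv i 2) (m + i) else m
termination_by i.toNat
decreasing_by exact pvHalf_lt i (by omega)

def fun9_alt (n : Int) : Int := fun9AltLoop n 0

-- ===== PRECONDITION & SPEC =====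
def Spec_fun9 (n : Int) (out : Int) : Prop := out = fun9_alt n
instance (n : Int) (out : Int) : Decidable (Spec_fun9 n out) := by unfold Spec_fun9; infer_instance

-- ===== CLAIM (what is proved, stated in full; the proofs are below) =====
def Claim_equal_fun9 : Prop := ∀ (n : Int), Dom_fun9 n → Spec_fun9 n (fun9 n)

-- ===== LEMMAS AND PROOFS =====
theorem fun9Inner_eq (i j m : Int) (h : j ≤ i) : fun9Inner i j m = m + (i - j) := by
  fun_induction fun9Inner i j m with
  | case1 j m hlt ih =>
      omega
  | case2 j m hlt =>
      omega

theorem fun9Outer_eq_alt (i m : Int) : fun9Outer i m = fun9AltLoop i m := by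
  fun_induction fun9Outer i m with
  | case1 i m hpos ih =>
      rw [fun9Inner_eq i 0 m (by omega), sub_zero] at ih ⊢
      rw [ih]
      conv_rhs => rw [fun9AltLoop, if_pos hpos]
  | case2 i m hpos =>
      rw [fun9AltLoop, if_neg hpos]

-- ===== VERDICT (by name: the statement is the Claim_ definition above) =====
theorem fun9_spec : Claim_equal_fun9 := by
  intro n _
  unfold Spec_fun9 fun9 fun9_alt
  exact fun9Outer_eq_alt n 0
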